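-- pv_equiv track=rewrite | github.com/Pritam154/python-programming-challenges | hackerrank/algorithms/implementation/lisaworkbook.py | return_chapter
-- ===== SOURCE A (Python) =====
-- def return_chapter(k, np, chapters_dict):
--     """k = problems/page, np = total_number_problems"""
--     problem = 1
--     while problem <= np:
--         if len(chapters_dict[max(chapters_dict)]) < k:
--             chapters_dict[max(chapters_dict)] = (
--                 chapters_dict[max(chapters_dict)] + [problem])
--         else:
--             chapters_dict[max(chapters_dict)+1] = [problem]
--         problem += 1
--     chapters_dict[max(chapters_dict)+1] = []  # start new page for next chapter
--     return chapters_dict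
-- ===== SOURCE B (Python) =====
-- def return_chapter(k, np, chapters_dict):
--     """k = problems/page, np = total_number_problems"""
--     cur = max(chapters_dict)
--     p = 1
--     while p <= np:
--         filled = len(chapters_dict[cur])
--         if filled < k:
--             take = min(k - filled, np - p + 1)
--             chapters_dict[cur] = chapters_dict[cur] + list(range(p, p + take))
--             p += take
--         else:
--             cur += 1
--             chapters_dict[cur] = [p]
--             p += 1
--     chapters_dict[cur + 1] = []  # start new page for next chapter
--     return chapters_dict
-- ===== Notes on version B (the rewrite author's own statement) =====
-- stated objective: faster
-- what changed: B computes the running maximum key once before the loop and fills a whole page (a min(k-filled, remaining) block of consecutive problems, via range) per iteration, instead of A's recomputing max(chapters_dict) three times and appending a single problem on every loop turn.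
-- outside the precondition, e.g. on return_chapter(2, 3, {}): A raises ValueError, B raises ValueError
import Mathlib
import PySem

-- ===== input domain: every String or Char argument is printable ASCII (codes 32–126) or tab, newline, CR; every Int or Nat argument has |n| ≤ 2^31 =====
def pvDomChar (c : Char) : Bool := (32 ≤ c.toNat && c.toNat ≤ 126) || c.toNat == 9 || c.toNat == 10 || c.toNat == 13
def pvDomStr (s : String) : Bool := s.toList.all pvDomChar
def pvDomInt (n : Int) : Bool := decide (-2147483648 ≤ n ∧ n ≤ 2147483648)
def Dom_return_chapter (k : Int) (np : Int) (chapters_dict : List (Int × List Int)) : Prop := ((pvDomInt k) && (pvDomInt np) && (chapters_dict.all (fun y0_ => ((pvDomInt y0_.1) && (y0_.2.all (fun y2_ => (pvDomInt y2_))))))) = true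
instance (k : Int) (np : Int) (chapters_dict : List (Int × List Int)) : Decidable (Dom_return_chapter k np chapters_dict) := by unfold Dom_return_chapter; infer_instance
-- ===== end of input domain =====

-- B computes the running max key once and fills whole pages per iteration instead of
-- recomputing max(dict) and appending one problem per loop turn (objective: faster).
-- Both A and B mutate chapters_dict in place in Python, to the same final state;
-- the theorems here are about the returned dict.

-- ===== PORT A =====
-- A's while loop, one problem per step; `max(chapters_dict)` is PySem.List.max? over the
-- keys (none = ValueError on an empty dict, excluded by Pre_; then returning d is unreachable).
-- `chapters_dict[max(chapters_dict)]` reads an existing key (the max of the keys), so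
-- getD _ [] returns exactly that value.
def returnChapterLoopA (k : Int) (np : Int) (problem : Int) (d : PySem.Dict Int (List Int)) :
    PySem.Dict Int (List Int) :=
  if _h : problem ≤ np then
    match PySem.List.max? d.keys (fun x => x) with
    | none => d
    | some m =>
      if ((d.getD m []).length : Int) < k then
        returnChapterLoopA k np (problem + 1) (d.insert m (d.getD m [] ++ [problem]))
      else
        returnChapterLoopA k np (problem + 1) (d.insert (m + 1) [problem])
  else d
termination_by (np + 1 - problem).toNat
decreasing_by all_goals omega

def return_chapter (k : Int) (np : Int) (chapters_dict : List (Int × List Int)) :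
    List (Int × List Int) :=
  let d := returnChapterLoopA k np 1 (PySem.Dict.ofList chapters_dict)
  match PySem.List.max? d.keys (fun x => x) with
  | none => d.items  -- Python raises ValueError here (empty dict); excluded by Pre_
  | some m => (d.insert (m + 1) []).items

-- ===== PORT B =====
-- B's while loop: cur is the running max key; a whole block of `take` consecutive
-- problems is appended at once (list(range(p, p + take)) = pyRange p (p + take)).
def returnChapterLoopB (k : Int) (np : Int) (p : Int) (cur : Int)
    (d : PySem.Dict Int (List Int)) : Int × PySem.Dict Int (List Int) :=
  if h : p ≤ np then
    let filled : Int := (d.getD cur []).length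
    if hf : filled < k then
      let take := min (k - filled) (np - p + 1)
      returnChapterLoopB k np (p + take) cur
        (d.insert cur (d.getD cur [] ++ PySem.List.pyRange p (p + take)))
    else
      returnChapterLoopB k np (p + 1) (cur + 1) (d.insert (cur + 1) [p])
  else (cur, d)
termination_by (np + 1 - p).toNat
decreasing_by all_goals (simp only [Int.lt_iff_add_one_le] at *; omega)

def return_chapter_alt (k : Int) (np : Int) (chapters_dict : List (Int × List Int)) :
    List (Int × List Int) :=
  let d := PySem.Dict.ofList chapters_dict
  match PySem.List.max? d.keys (fun x => x) with
  | none => d.items  -- Python raises ValueError here (empty dict); excluded by Pre_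
  | some cur0 =>
    let r := returnChapterLoopB k np 1 cur0 d
    (r.2.insert (r.1 + 1) []).items

-- ===== PRECONDITION & SPEC =====
-- Pre_ excludes only the empty dict, on which Python A (and B) raise ValueError at max({}).
def Pre_return_chapter (k : Int) (np : Int) (chapters_dict : List (Int × List Int)) : Prop :=
  chapters_dict ≠ []
instance (k : Int) (np : Int) (chapters_dict : List (Int × List Int)) :
    Decidable (Pre_return_chapter k np chapters_dict) := by unfold Pre_return_chapter; infer_instance

def pvWitness_return_chapter : Int × Int × (List (Int × List Int)) := (2, 5, [(1, [7])])

def Spec_return_chapter (k : Int) (np : Int) (chapters_dict : List (Int × List Int))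
    (out : List (Int × List Int)) : Prop := out = return_chapter_alt k np chapters_dict
instance (k : Int) (np : Int) (chapters_dict : List (Int × List Int))
    (out : List (Int × List Int)) : Decidable (Spec_return_chapter k np chapters_dict out) := by
  unfold Spec_return_chapter; infer_instance

-- ===== CLAIM (what is proved, stated in full; the proofs are below) =====
def Claim_equal_return_chapter : Prop := ∀ (k : Int) (np : Int) (chapters_dict : List (Int × List Int)), Dom_return_chapter k np chapters_dict → Pre_return_chapter k np chapters_dict → Spec_return_chapter k np chapters_dict (return_chapter k np chapters_dict)

-- ===== LEMMAS AND PROOFS =====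

-- foldl max stays below a strict upper bound of all inputs
theorem pv_foldl_max_lt {a x : Int} (t : List Int) (ha : a < x) (ht : ∀ y ∈ t, y < x) :
    t.foldl max a < x := by
  induction t generalizing a with
  | nil => simpa using ha
  | cons b t ih =>
    simp only [List.foldl_cons]
    exact ih (max_lt ha (ht b (by simp))) (fun y hy => ht y (by simp [hy]))

-- appending a strictly larger element makes it the (unique) max
theorem pv_max_append {l : List Int} {x : Int} (hne : l ≠ []) (h : ∀ y ∈ l, y < x) :
    PySem.List.max? (l ++ [x]) (fun y => y) = some x := by
  obtain ⟨a, t, rfl⟩ := List.exists_cons_of_ne_nil hne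
  rw [List.cons_append, PySem.List.max?_id_cons, List.foldl_append]
  have : t.foldl max a < x :=
    pv_foldl_max_lt t (h a (by simp)) (fun y hy => h y (by simp [hy]))
  simp [max_eq_right (le_of_lt this)]

-- inserting at the current max key keeps the max
theorem pv_max_insert_self {d : PySem.Dict Int (List Int)} {m : Int} (v : List Int)
    (hm : PySem.List.max? d.keys (fun x => x) = some m) :
    PySem.List.max? (d.insert m v).keys (fun x => x) = some m := by
  have hc : d.contains m = true :=
    (PySem.Dict.contains_iff_mem_keys d m).mpr (PySem.List.max?_mem hm)
  rw [PySem.Dict.keys_insert_of_contains d v hc]; exact hm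

-- inserting at max+1 makes max+1 the new max
theorem pv_max_insert_succ {d : PySem.Dict Int (List Int)} {m : Int} (v : List Int)
    (hm : PySem.List.max? d.keys (fun x => x) = some m) :
    PySem.List.max? (d.insert (m + 1) v).keys (fun x => x) = some (m + 1) := by
  have hc : d.contains (m + 1) = false := by
    by_contra hcc
    have : m + 1 ∈ d.keys := (PySem.Dict.contains_iff_mem_keys d (m + 1)).mp
      (by simpa using hcc)
    have := PySem.List.max?_isMax hm _ this
    omega
  rw [PySem.Dict.keys_insert_of_not_contains d v hc]
  have hne : d.keys ≠ [] := by
    intro he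
    have : PySem.List.max? ([] : List Int) (fun x => x) = none :=
      (PySem.List.max?_eq_none_iff _ _).mpr rfl
    rw [he, this] at hm
    cases hm
  refine pv_max_append hne ?_
  intro y hy
  have := PySem.List.max?_isMax hm y hy
  omega

-- re-inserting the value already stored at a key is a no-op
theorem pv_insert_getD_self (d : PySem.Dict Int (List Int)) (m : Int)
    (hnd : d.keys.Nodup) (hc : d.contains m = true) :
    d.insert m (d.getD m []) = d := by
  apply PySem.Dict.ext
  rw [PySem.Dict.items_insert_of_contains d _ hc]
  conv_rhs => rw [← List.map_id d.items]
  apply List.map_congr_left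
  intro p hp
  obtain ⟨p1, p2⟩ := p
  by_cases hpk : p1 = m
  · subst hpk
    have : d.getD p1 [] = p2 := PySem.Dict.getD_of_mem_items d hp hnd []
    simp [this]
  · simp [hpk]

-- `t` consecutive single-problem steps of A on a non-full page equal one block insert
theorem pv_fill_steps (k np : Int) (m : Int) (t : Nat) :
    ∀ (p : Int) (d : PySem.Dict Int (List Int)),
    d.keys.Nodup →
    PySem.List.max? d.keys (fun x => x) = some m →
    ((d.getD m []).length : Int) + t ≤ k →
    p + t - 1 ≤ np →
    returnChapterLoopA k np p d
      = returnChapterLoopA k np (p + t)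
          (d.insert m (d.getD m [] ++ PySem.List.pyRange p (p + t))) := by
  induction t with
  | zero =>
    intro p d hnd hm _ _
    have hc : d.contains m = true :=
      (PySem.Dict.contains_iff_mem_keys d m).mpr (PySem.List.max?_mem hm)
    have : PySem.List.pyRange p (p + (0 : Nat)) = [] := by
      rw [PySem.List.pyRange_one]; simp
    rw [this, List.append_nil, pv_insert_getD_self d m hnd hc]
    norm_num
  | succ t ih =>
    intro p d hnd hm hlen hp
    have hlt : ((d.getD m []).length : Int) < k := by push_cast at hlen ⊢; omega
    have hple : p ≤ np := by push_cast at hp; omega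
    rw [returnChapterLoopA]
    simp only [dif_pos hple, hm]
    rw [if_pos hlt]
    have hnd1 : (d.insert m (d.getD m [] ++ [p])).keys.Nodup :=
      PySem.Dict.nodup_keys_insert d m _ hnd
    have hm1 : PySem.List.max? (d.insert m (d.getD m [] ++ [p])).keys (fun x => x) = some m :=
      pv_max_insert_self _ hm
    have hget1 : (d.insert m (d.getD m [] ++ [p])).getD m [] = d.getD m [] ++ [p] :=
      PySem.Dict.getD_insert_self d m _ []
    have := ih (p + 1) (d.insert m (d.getD m [] ++ [p])) hnd1 hm1
      (by rw [hget1]; push_cast at hlen ⊢; simp; omega)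
      (by push_cast at hp ⊢; omega)
    rw [this, hget1, PySem.Dict.insert_insert_self]
    have hrange : (p : Int) :: PySem.List.pyRange (p + 1) (p + 1 + t) =
        PySem.List.pyRange p (p + (t + 1 : Nat)) := by
      have : (p : Int) + (t + 1 : Nat) = p + 1 + t := by omega
      rw [this, ← PySem.List.pyRange_one_cons (by omega)]
    rw [List.append_assoc, List.singleton_append, hrange]
    have : p + 1 + (t : Int) = p + ((t + 1 : Nat) : Int) := by push_cast; ring
    rw [this]

-- main loop correspondence: A's one-at-a-time loop equals B's block loop, and B's
-- tracked cur is the max key of A's resulting dict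
theorem pv_main (k np : Int) (fuel : Nat) :
    ∀ (p cur : Int) (d : PySem.Dict Int (List Int)),
    (np + 1 - p).toNat ≤ fuel →
    d.keys.Nodup →
    PySem.List.max? d.keys (fun x => x) = some cur →
    returnChapterLoopA k np p d = (returnChapterLoopB k np p cur d).2 ∧
    PySem.List.max? (returnChapterLoopA k np p d).keys (fun x => x)
      = some (returnChapterLoopB k np p cur d).1 := by
  induction fuel with
  | zero =>
    intro p cur d hfuel hnd hm
    have hgt : ¬ p ≤ np := by omega
    rw [returnChapterLoopA, dif_neg hgt, returnChapterLoopB, dif_neg hgt]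
    exact ⟨rfl, hm⟩
  | succ fuel ih =>
    intro p cur d hfuel hnd hm
    by_cases hple : p ≤ np
    · rw [returnChapterLoopB, dif_pos hple]
      by_cases hlt : ((d.getD cur []).length : Int) < k
      · simp only [hlt, dif_pos]
        set take := min (k - ((d.getD cur []).length : Int)) (np - p + 1) with htake
        have htake1 : 1 ≤ take := by omega
        have htnat : ((take.toNat : Int)) = take := Int.toNat_of_nonneg (by omega)
        have hfill := pv_fill_steps k np cur take.toNat p d hnd hm
          (by rw [htnat]; omega) (by rw [htnat]; omega)
        rw [htnat] at hfill
        set d2 := d.insert cur (d.getD cur [] ++ PySem.List.pyRange p (p + take)) with hd2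
        have hnd2 : d2.keys.Nodup := PySem.Dict.nodup_keys_insert d cur _ hnd
        have hm2 : PySem.List.max? d2.keys (fun x => x) = some cur := pv_max_insert_self _ hm
        have := ih (p + take) cur d2 (by omega) hnd2 hm2
        rw [hfill]
        exact this
      · simp only [hlt, dif_neg, not_false_iff]
        rw [returnChapterLoopA]
        simp only [dif_pos hple, hm, if_neg hlt]
        set d3 := d.insert (cur + 1) [p] with hd3
        have hnd3 : d3.keys.Nodup := PySem.Dict.nodup_keys_insert d (cur + 1) _ hnd
        have hm3 : PySem.List.max? d3.keys (fun x => x) = some (cur + 1) :=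
          pv_max_insert_succ _ hm
        exact ih (p + 1) (cur + 1) d3 (by omega) hnd3 hm3
    · rw [returnChapterLoopA, dif_neg hple, returnChapterLoopB, dif_neg hple]
      exact ⟨rfl, hm⟩

-- a nonempty input list gives a dict with at least one key
theorem pv_ofList_keys_ne_nil (ps : List (Int × List Int)) (h : ps ≠ []) :
    (PySem.Dict.ofList ps).keys ≠ [] := by
  obtain ⟨⟨a, v⟩, hmem⟩ := List.exists_mem_of_ne_nil ps h
  have hk : (PySem.Dict.ofList ps).keys
      = PySem.Set.update (PySem.Dict.empty (κ := Int) (ν := List Int)).keys (ps.map (·.1)) :=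
    PySem.Dict.keys_foldl_insert_key ps (fun p => p.1) (fun _ p => p.2) _
  have ha : a ∈ PySem.Set.update (PySem.Dict.empty (κ := Int) (ν := List Int)).keys
      (ps.map (·.1)) := by
    have : a ∈ ps.map (·.1) := List.mem_map.mpr ⟨(a, v), hmem, rfl⟩
    simp [PySem.Set.mem_update, this]
  intro he
  rw [hk] at he; rw [he] at ha; simp at ha

-- ===== VERDICT (by name: the statement is the Claim_ definition above) =====
theorem return_chapter_spec : Claim_equal_return_chapter := by
  intro k np cd _hdom hpre
  simp only [Spec_return_chapter, return_chapter, return_chapter_alt]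
  set d0 := PySem.Dict.ofList cd with hd0
  have hne : d0.keys ≠ [] := pv_ofList_keys_ne_nil cd hpre
  cases hm : PySem.List.max? d0.keys (fun x => x) with
  | none => exact absurd ((PySem.List.max?_eq_none_iff _ _).mp hm) hne
  | some cur0 =>
    have hnd0 : d0.keys.Nodup := PySem.Dict.nodup_keys_ofList cd
    obtain ⟨h1, h2⟩ := pv_main k np (np + 1 - 1).toNat 1 cur0 d0 (le_refl _) hnd0 hm
    simp only [h2]; simp only [h1]
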